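-- pv_equiv track=rewrite | github.com/zxc479773533/2017-Seed-Cup-Round-2 | wzh_cycle/regular2.py | ChooseUser
-- ===== SOURCE A (Python) =====
-- def ChooseUser(mat_data):
--     ret = {}
--     for i in range(len(mat_data)):
--         if mat_data[i][0] in ret :
--             ret[mat_data[i][0]].append(i)
--         else:
--             ret[mat_data[i][0]] = [i]
--     temp = []
--     for key in ret:
--         if len(ret[key]) == 1:
--             temp.append(key)
--     for i in range(len(temp)):
--         ret.pop(temp[i])
--     return ret
-- ===== SOURCE B (Python) =====
-- def ChooseUser(mat_data):
--     ret = {}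
--     for k in (row[0] for row in mat_data):
--         if k not in ret:
--             idxs = [i for i, row in enumerate(mat_data) if row[0] == k]
--             if len(idxs) > 1:
--                 ret[k] = idxs
--     return ret
-- ===== Notes on version B (the rewrite author's own statement) =====
-- stated objective: alternative
-- what changed: B drops A's grouping dict entirely: at each key's first occurrence it rescans the whole matrix with one enumerated comprehension to collect that key's indices and keeps the group only if it has at least two members (per-distinct-key full scans, O(n*k)), instead of A's single-pass bucket-everything then collect-singleton-keys-and-pop passes.
-- outside the precondition, e.g. on ChooseUser([[]]): A raises IndexError, B raises IndexError
import Mathlib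
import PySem

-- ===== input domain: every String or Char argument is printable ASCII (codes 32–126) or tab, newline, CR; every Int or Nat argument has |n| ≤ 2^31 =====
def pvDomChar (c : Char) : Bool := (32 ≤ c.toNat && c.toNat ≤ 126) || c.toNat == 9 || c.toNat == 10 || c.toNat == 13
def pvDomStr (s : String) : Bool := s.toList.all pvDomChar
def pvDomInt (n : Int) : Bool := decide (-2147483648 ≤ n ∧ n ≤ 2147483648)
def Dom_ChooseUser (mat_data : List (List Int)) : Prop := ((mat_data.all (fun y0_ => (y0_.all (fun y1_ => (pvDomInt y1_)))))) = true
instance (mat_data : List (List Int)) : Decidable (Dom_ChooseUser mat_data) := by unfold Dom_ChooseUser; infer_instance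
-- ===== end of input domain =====

-- B replaces A's bucket-everything-then-prune-singletons dict passes by per-distinct-key full
-- rescans: at each key's first occurrence one enumerated scan collects its indices, kept only
-- if the group has ≥ 2 members (alternative decomposition, no grouping dict).

-- ===== PORT A =====
def ChooseUser (mat_data : List (List Int)) : List (Int × List Int) :=
  -- for i in range(len(mat_data)): group index i under key mat_data[i][0]
  let ret : PySem.Dict Int (List Int) :=
    (PySem.List.pyRange 0 (PySem.List.len mat_data) 1).foldl (fun ret i =>
      let key := PySem.List.pyGetD (PySem.List.pyGetD mat_data i []) 0 0
      if ret.contains key then ret.modify key [] (fun v => v ++ [i])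
      else ret.insert key [i]) PySem.Dict.empty
  -- temp = keys whose group has length 1
  let temp : List Int := ret.keys.foldl (fun temp key =>
      if (ret.getD key []).length = 1 then temp ++ [key] else temp) []
  -- for i in range(len(temp)): ret.pop(temp[i])
  ((PySem.List.pyRange 0 (PySem.List.len temp) 1).foldl (fun r i =>
      r.erase (PySem.List.pyGetD temp i 0)) ret).items

-- ===== PORT B =====
def ChooseUser_alt (mat_data : List (List Int)) : List (Int × List Int) :=
  -- for k in (row[0] for row in mat_data): if k not in ret:
  --   idxs = [i for i, row in enumerate(mat_data) if row[0] == k]; if len(idxs) > 1: ret[k] = idxs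
  (mat_data.foldl (fun ret row =>
      let k := PySem.List.pyGetD row 0 0
      if ret.contains k then ret
      else
        let idxs := ((PySem.List.enumerate mat_data).filter
          (fun p => PySem.List.pyGetD p.2 0 0 == k)).map (·.1)
        if idxs.length > 1 then ret.insert k idxs else ret)
    (PySem.Dict.empty : PySem.Dict Int (List Int))).items

-- ===== PRECONDITION & SPEC =====
-- Pre_ excludes matrices containing an empty row, on which A's mat_data[i][0] raises IndexError (B raises there too).
def Pre_ChooseUser (mat_data : List (List Int)) : Prop := ∀ row ∈ mat_data, row ≠ []
instance (mat_data : List (List Int)) : Decidable (Pre_ChooseUser mat_data) := by unfold Pre_ChooseUser; infer_instance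
def pvWitness_ChooseUser : List (List Int) := [[1, 7], [2], [1, 3]]
def Spec_ChooseUser (mat_data : List (List Int)) (out : List (Int × List Int)) : Prop := out = ChooseUser_alt mat_data
instance (mat_data : List (List Int)) (out : List (Int × List Int)) : Decidable (Spec_ChooseUser mat_data out) := by unfold Spec_ChooseUser; infer_instance

-- ===== CLAIM (what is proved, stated in full; the proofs are below) =====
def Claim_equal_ChooseUser : Prop := ∀ (mat_data : List (List Int)), Dom_ChooseUser mat_data → Pre_ChooseUser mat_data → Spec_ChooseUser mat_data (ChooseUser mat_data)

-- ===== LEMMAS AND PROOFS =====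

-- the grouping dict A builds, over (key, index) pairs
def pvGroup (qs : List (Int × Int)) : PySem.Dict Int (List Int) :=
  qs.foldl (fun d q => d.modify q.1 [] (fun v => v ++ [q.2])) PySem.Dict.empty

theorem pvGroup_keys (qs : List (Int × Int)) :
    (pvGroup qs).keys = PySem.Set.ofList (qs.map (·.1)) := by
  unfold pvGroup
  rw [PySem.Dict.keys_foldl_modify_key qs (fun q => q.1) [] (fun _ q v => v ++ [q.2])]
  simp [PySem.Set.update, PySem.Set.ofList_eq_foldl, PySem.Dict.keys_empty]

theorem pvGroup_nodup (qs : List (Int × Int)) : (pvGroup qs).keys.Nodup := by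
  unfold pvGroup
  exact PySem.Dict.nodup_keys_foldl_modify_key qs (fun q => q.1) [] (fun _ q v => v ++ [q.2]) _
    (by simp [PySem.Dict.keys_empty])

theorem pvGroup_getD (qs : List (Int × Int)) (c : Int) :
    (pvGroup qs).getD c [] = (qs.filter (fun q => q.1 == c)).map (·.2) := by
  unfold pvGroup
  rw [PySem.Dict.getD_foldl_modify_append]
  simp

theorem pvGroup_getD_len (qs : List (Int × Int)) (c : Int) :
    ((pvGroup qs).getD c []).length = (qs.map (·.1)).count c := by
  rw [pvGroup_getD]
  simp only [List.length_map, List.count_eq_countP, ← List.countP_eq_length_filter, List.countP_map]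
  rfl

-- erasing a list of keys filters the items list
theorem pv_items_foldl_erase (ks : List Int) (d : PySem.Dict Int (List Int)) :
    (ks.foldl (fun r k => r.erase k) d).items
      = d.items.filter (fun p => decide (p.1 ∉ ks)) := by
  induction ks generalizing d with
  | nil => simp
  | cons k ks ih =>
    rw [List.foldl_cons, ih]
    have herase : (d.erase k).items = d.items.filter (fun p => !(p.1 == k)) := by
      simp [PySem.Dict.erase]
    rw [herase, List.filter_filter]
    apply List.filter_congr
    intro p _
    by_cases h : p.1 = k <;> simp [h, Bool.and_comm]

-- A's grouping loop builds pvGroup over the (key, index) pairs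
theorem pvA_loop1 (mat_data : List (List Int)) :
    (PySem.List.pyRange 0 (PySem.List.len mat_data) 1).foldl (fun ret i =>
      let key := PySem.List.pyGetD (PySem.List.pyGetD mat_data i []) 0 0
      if ret.contains key then ret.modify key [] (fun v => v ++ [i])
      else ret.insert key [i]) PySem.Dict.empty
    = pvGroup ((PySem.List.enumerate mat_data).map (fun p => (PySem.List.pyGetD p.2 0 0, p.1))) := by
  have hbody : (fun (ret : PySem.Dict Int (List Int)) (i : Int) =>
      let key := PySem.List.pyGetD (PySem.List.pyGetD mat_data i []) 0 0
      if ret.contains key then ret.modify key [] (fun v => v ++ [i])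
      else ret.insert key [i])
      = fun ret i => ret.modify (PySem.List.pyGetD (PySem.List.pyGetD mat_data i []) 0 0) [] (fun v => v ++ [i]) := by
    funext ret i
    simp only []
    split
    · rfl
    · next h =>
      simp [PySem.Dict.modify, PySem.Dict.getD_of_not_contains _ _ (by simpa using h)]
  rw [hbody]
  unfold pvGroup
  rw [List.foldl_map, PySem.List.enumerate_eq_map_pyRange mat_data ([] : List Int), List.foldl_map]

-- A's singleton-collect-and-pop tail filters the items of any Nodup-keyed dict
theorem pvA_tail (d : PySem.Dict Int (List Int)) (hnd : d.keys.Nodup) :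
    (let temp : List Int := d.keys.foldl (fun temp key =>
        if (d.getD key []).length = 1 then temp ++ [key] else temp) []
     ((PySem.List.pyRange 0 (PySem.List.len temp) 1).foldl (fun r i =>
        r.erase (PySem.List.pyGetD temp i 0)) d).items)
    = (d.keys.filter (fun k => decide ((d.getD k []).length ≠ 1))).map (fun k => (k, d.getD k [])) := by
  simp only [PySem.List.foldl_append_ite_eq_filter, List.nil_append]
  rw [PySem.List.foldl_pyRange_pyGetD _ 0 (fun r k => r.erase k) d (by norm_num)]
  simp only [Int.toNat_zero, List.drop_zero]
  rw [pv_items_foldl_erase, PySem.Dict.items_eq_map_keys d hnd [], List.filter_map]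
  congr 1
  apply List.filter_congr
  intro k hk
  simp only [Function.comp, List.mem_filter, decide_eq_decide]
  simp [hk]

-- A's result, canonically
theorem pvA_canon (mat_data : List (List Int)) :
    ChooseUser mat_data
      = ((PySem.Set.ofList ((PySem.List.enumerate mat_data).map (fun p => PySem.List.pyGetD p.2 0 0))).filter
          (fun k => decide (((PySem.List.enumerate mat_data).map (fun p => PySem.List.pyGetD p.2 0 0)).count k ≠ 1))).map
          (fun k => (k, (pvGroup ((PySem.List.enumerate mat_data).map (fun p => (PySem.List.pyGetD p.2 0 0, p.1)))).getD k [])) := by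
  unfold ChooseUser
  rw [pvA_loop1]
  rw [pvA_tail _ (pvGroup_nodup _)]
  rw [pvGroup_keys]
  simp only [pvGroup_getD_len, List.map_map]
  rfl

-- ===== B-side lemmas =====

-- the per-key rescan B performs
def pvScan (mat_data : List (List Int)) (k : Int) : List Int :=
  ((PySem.List.enumerate mat_data).filter (fun p => PySem.List.pyGetD p.2 0 0 == k)).map (·.1)

theorem pvScan_eq_group (mat_data : List (List Int)) (k : Int) :
    pvScan mat_data k
      = (pvGroup ((PySem.List.enumerate mat_data).map (fun p => (PySem.List.pyGetD p.2 0 0, p.1)))).getD k [] := by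
  rw [pvGroup_getD, List.filter_map, List.map_map]
  rfl

-- the dict B has built after seeing the keys in s
def pvBDict (g : Int → List Int) (s : List Int) : PySem.Dict Int (List Int) :=
  PySem.Dict.mk (((PySem.Set.ofList s).filter (fun k => decide (1 < (g k).length))).map (fun k => (k, g k)))

def pvStep (g : Int → List Int) (d : PySem.Dict Int (List Int)) (k : Int) : PySem.Dict Int (List Int) :=
  if d.contains k then d
  else if (g k).length > 1 then d.insert k (g k) else d

theorem pvBDict_keys (g : Int → List Int) (s : List Int) :
    (pvBDict g s).keys = (PySem.Set.ofList s).filter (fun k => decide (1 < (g k).length)) := by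
  show List.map (·.1) (List.map (fun k => (k, g k)) _) = _
  rw [List.map_map]
  exact List.map_id _

theorem pv_ofList_append_singleton (s : List Int) (k : Int) :
    PySem.Set.ofList (s ++ [k])
      = if k ∈ s then PySem.Set.ofList s else PySem.Set.ofList s ++ [k] := by
  rw [PySem.Set.ofList_eq_foldl, List.foldl_append, ← PySem.Set.ofList_eq_foldl]
  by_cases h : k ∈ s
  · have : k ∈ PySem.Set.ofList s := (PySem.Set.mem_ofList _ _).2 h
    simp [PySem.Set.add, this, h]
  · have : k ∉ PySem.Set.ofList s := fun hm => h ((PySem.Set.mem_ofList _ _).1 hm)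
    simp only [List.foldl_cons, List.foldl_nil, PySem.Set.add, h]
    simp [this]

theorem pvStep_pvBDict (g : Int → List Int) (s : List Int) (k : Int) :
    pvStep g (pvBDict g s) k = pvBDict g (s ++ [k]) := by
  have hcont : (pvBDict g s).contains k
      = decide (k ∈ s ∧ 1 < (g k).length) := by
    rw [PySem.Dict.contains_eq_decide_mem_keys, pvBDict_keys]
    simp [List.mem_filter, PySem.Set.mem_ofList]
  by_cases hs : k ∈ s
  · have hset : PySem.Set.ofList (s ++ [k]) = PySem.Set.ofList s := by
      rw [pv_ofList_append_singleton]; simp [hs]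
    by_cases hb : 1 < (g k).length
    · simp [pvStep, hs, hb, pvBDict, hset]
    · simp [pvStep, hs, hb, pvBDict, hset]
  · have hset : PySem.Set.ofList (s ++ [k]) = PySem.Set.ofList s ++ [k] := by
      rw [pv_ofList_append_singleton]; simp [hs]
    have hc : (pvBDict g s).contains k = false := by simp [hcont, hs]
    by_cases hb : 1 < (g k).length
    · apply PySem.Dict.ext
      rw [pvStep, hc]
      simp only [Bool.false_eq_true, if_false, gt_iff_lt, hb, if_true]
      simp [PySem.Dict.items_insert, pvBDict, hset, List.filter_append, hb]
      exact fun h => absurd h hs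
    · simp only [pvStep, hc, Bool.false_eq_true, if_false, gt_iff_lt, hb, if_false]
      simp [pvBDict, hset, List.filter_append, hb]

theorem pvB_fold (g : Int → List Int) (l : List Int) :
    ∀ s : List Int, l.foldl (pvStep g) (pvBDict g s) = pvBDict g (s ++ l) := by
  induction l with
  | nil => intro s; simp
  | cons k l ih =>
    intro s
    rw [List.foldl_cons, pvStep_pvBDict, ih]
    simp

-- B's result, canonically
theorem pvB_canon (mat_data : List (List Int)) :
    ChooseUser_alt mat_data
      = ((PySem.Set.ofList ((PySem.List.enumerate mat_data).map (fun p => PySem.List.pyGetD p.2 0 0))).filter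
          (fun k => decide (1 < ((PySem.List.enumerate mat_data).map (fun p => PySem.List.pyGetD p.2 0 0)).count k))).map
          (fun k => (k, (pvGroup ((PySem.List.enumerate mat_data).map (fun p => (PySem.List.pyGetD p.2 0 0, p.1)))).getD k [])) := by
  have hfold : (mat_data.foldl (fun ret row =>
      let k := PySem.List.pyGetD row 0 0
      if ret.contains k then ret
      else
        let idxs := ((PySem.List.enumerate mat_data).filter
          (fun p => PySem.List.pyGetD p.2 0 0 == k)).map (·.1)
        if idxs.length > 1 then ret.insert k idxs else ret)
      (PySem.Dict.empty : PySem.Dict Int (List Int)))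
      = (mat_data.map (fun row => PySem.List.pyGetD row 0 0)).foldl
          (pvStep (pvScan mat_data)) (pvBDict (pvScan mat_data) []) := by
    rw [List.foldl_map]
    rfl
  unfold ChooseUser_alt
  rw [hfold, pvB_fold, List.nil_append]
  have hkeys : mat_data.map (fun row => PySem.List.pyGetD row 0 0)
      = (PySem.List.enumerate mat_data).map (fun p => PySem.List.pyGetD p.2 0 0) := by
    conv_lhs => rw [← PySem.List.map_snd_enumerate mat_data 0]
    rw [List.map_map]
    rfl
  rw [pvBDict, hkeys]
  have : (PySem.Dict.mk (((PySem.Set.ofList ((PySem.List.enumerate mat_data).map (fun p => PySem.List.pyGetD p.2 0 0))).filter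
      (fun k => decide (1 < (pvScan mat_data k).length))).map (fun k => (k, pvScan mat_data k)))).items
      = ((PySem.Set.ofList ((PySem.List.enumerate mat_data).map (fun p => PySem.List.pyGetD p.2 0 0))).filter
      (fun k => decide (1 < (pvScan mat_data k).length))).map (fun k => (k, pvScan mat_data k)) := rfl
  rw [this]
  simp only [pvScan_eq_group]
  simp only [pvGroup_getD_len, List.map_map]
  rfl

-- ===== VERDICT (by name: the statement is the Claim_ definition above) =====
theorem ChooseUser_spec : Claim_equal_ChooseUser := by
  intro mat_data _ _
  unfold Spec_ChooseUser
  rw [pvA_canon, pvB_canon]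
  congr 1
  apply List.filter_congr
  intro k hk
  have hmem : k ∈ (PySem.List.enumerate mat_data).map (fun p => PySem.List.pyGetD p.2 0 0) :=
    (PySem.Set.mem_ofList _ _).1 hk
  have h1 : 1 ≤ ((PySem.List.enumerate mat_data).map (fun p => PySem.List.pyGetD p.2 0 0)).count k :=
    List.one_le_count_iff.2 hmem
  simp only [decide_eq_decide]
  omega
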